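-- pv_equiv track=rewrite | github.com/dhh1128/minicss | getminu.py | get_naive_unique_prefix
-- ===== SOURCE A (Python) =====
-- def get_naive_unique_prefix(word, words):
--     if not word:
--         raise ValueError("empty word")
--     common_char_count = 0
--     word_len = len(word)
--     for w in words:
--         if w != word:
--             w_len = len(w)
--             end = min(word_len, w_len)
--             found_diff = False
--             for i in range(end):
--                 if word[i] != w[i]:
--                     found_diff = True
--                     break
--                 if i + 1 > common_char_count:
--                     common_char_count = i + 1
--             if not found_diff:
--                 raise Exception("no unique prefix")
--     if common_char_count == word_len:
--         raise Exception("no unique prefix")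
--     return word[:max(common_char_count, 1)]
-- ===== SOURCE B (Python) =====
-- def get_naive_unique_prefix(word, words):
--     if not word:
--         raise ValueError("empty word")
--     others = [w for w in words if w != word]
--     if any(w.startswith(word) or word.startswith(w) for w in others):
--         raise Exception("no unique prefix")
--     k = len(word)
--     while k > 0 and not any(w.startswith(word[:k]) for w in others):
--         k -= 1
--     return word[:max(k, 1)]
-- ===== Notes on version B (the rewrite author's own statement) =====
-- stated objective: alternative
-- what changed: Replaces A's nested per-character index loops with a shared mutable max-counter by: filter out word, test prefix containment with startswith, then a descending search over prefix lengths k for the largest k such that word[:k] is a prefix of some other word.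
import Mathlib
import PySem

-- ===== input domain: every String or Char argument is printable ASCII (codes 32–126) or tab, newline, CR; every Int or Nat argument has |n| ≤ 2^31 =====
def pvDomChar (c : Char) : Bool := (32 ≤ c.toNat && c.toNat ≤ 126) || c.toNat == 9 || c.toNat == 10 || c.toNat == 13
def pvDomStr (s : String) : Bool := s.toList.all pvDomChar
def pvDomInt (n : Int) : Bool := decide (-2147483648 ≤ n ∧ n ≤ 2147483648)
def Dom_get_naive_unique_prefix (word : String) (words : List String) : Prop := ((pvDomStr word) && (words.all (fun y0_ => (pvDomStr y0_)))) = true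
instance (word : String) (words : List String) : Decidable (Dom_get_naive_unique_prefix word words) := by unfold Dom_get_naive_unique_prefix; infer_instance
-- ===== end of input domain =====

-- B replaces A's nested per-character index loops (with a shared running max) by a startswith-based
-- containment test plus a descending search over prefix lengths; alternative decomposition, not faster.

-- ===== PORT A =====
-- inner loop 'for i in range(end)': structural recursion over both suffixes, carrying the index i
-- and the running common counter; first component = found_diff.
def pvAInner (i common : Nat) : List Char → List Char → Bool × Nat
  | [], _ => (false, common)
  | _, [] => (false, common)
  | a :: as, b :: bs =>
      if a ≠ b then (true, common)
      else pvAInner (i + 1) (if i + 1 > common then i + 1 else common) as bs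

-- outer loop 'for w in words': state = (exception-raised flag, common_char_count)
def pvAOuter (word : String) : List String → Bool → Nat → Bool × Nat
  | [], exc, common => (exc, common)
  | w :: ws, exc, common =>
      if exc then (exc, common)
      else if w = word then pvAOuter word ws exc common
      else
        let r := pvAInner 0 common word.toList w.toList
        if r.1 = false then (true, r.2)      -- 'if not found_diff: raise'
        else pvAOuter word ws false r.2

def get_naive_unique_prefix (word : String) (words : List String) : String :=
  if word.toList = [] then ""               -- Python raises ValueError here; excluded by Pre_
  else
    let r := pvAOuter word words false 0
    if r.1 then ""                          -- Python raises Exception here; excluded by Pre_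
    else if r.2 = word.toList.length then ""  -- Python raises Exception here; excluded by Pre_
    else String.ofList (word.toList.take (max r.2 1))   -- word[:max(common_char_count, 1)]

-- ===== PORT B =====
-- 'while k > 0 and not any(w.startswith(word[:k]) for w in others): k -= 1'
def pvBSearch (word : List Char) (others : List (List Char)) : Nat → Nat
  | 0 => 0
  | k + 1 =>
      if others.any (fun w => PySem.Chars.startswith w (word.take (k + 1))) then k + 1
      else pvBSearch word others k

def get_naive_unique_prefix_alt (word : String) (words : List String) : String :=
  if word.toList = [] then ""               -- raise ValueError
  else
    let others := (words.filter (fun w => w != word)).map String.toList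
    if others.any (fun w => PySem.Chars.startswith w word.toList || PySem.Chars.startswith word.toList w) then ""  -- raise
    else String.ofList (word.toList.take (max (pvBSearch word.toList others word.toList.length) 1))

-- ===== PRECONDITION & SPEC =====
-- Pre_ excludes exactly the inputs on which A raises: the empty word (ValueError), and word lists
-- containing some other w that is a prefix of word or of which word is a prefix (Exception 'no unique prefix').
def Pre_get_naive_unique_prefix (word : String) (words : List String) : Prop :=
  word ≠ "" ∧ ∀ w ∈ words, w ≠ word → ¬ (w.toList <+: word.toList) ∧ ¬ (word.toList <+: w.toList)
instance (word : String) (words : List String) : Decidable (Pre_get_naive_unique_prefix word words) := by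
  unfold Pre_get_naive_unique_prefix; infer_instance

def pvWitness_get_naive_unique_prefix : String × List String := ("ab", ["ac", "b"])

def Spec_get_naive_unique_prefix (word : String) (words : List String) (out : String) : Prop := out = get_naive_unique_prefix_alt word words
instance (word : String) (words : List String) (out : String) : Decidable (Spec_get_naive_unique_prefix word words out) := by unfold Spec_get_naive_unique_prefix; infer_instance

-- ===== CLAIM (what is proved, stated in full; the proofs are below) =====
def Claim_equal_get_naive_unique_prefix : Prop := ∀ (word : String) (words : List String), Dom_get_naive_unique_prefix word words → Pre_get_naive_unique_prefix word words → Spec_get_naive_unique_prefix word words (get_naive_unique_prefix word words)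

-- ===== LEMMAS AND PROOFS =====

-- longest common prefix length
def pvLcp : List Char → List Char → Nat
  | a :: as, b :: bs => if a = b then pvLcp as bs + 1 else 0
  | _, _ => 0

theorem pvLcp_le_min : ∀ (as bs : List Char), pvLcp as bs ≤ min as.length bs.length := by
  intro as
  induction as with
  | nil => intro bs; simp [pvLcp]
  | cons a as ih =>
    intro bs
    cases bs with
    | nil => simp [pvLcp]
    | cons b bs =>
      simp only [pvLcp, List.length_cons]
      split
      · have := ih bs; omega
      · omega

theorem pvLcp_comm : ∀ (as bs : List Char), pvLcp as bs = pvLcp bs as := by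
  intro as
  induction as with
  | nil => intro bs; cases bs <;> simp [pvLcp]
  | cons a as ih =>
    intro bs
    cases bs with
    | nil => simp [pvLcp]
    | cons b bs =>
      simp only [pvLcp]
      by_cases h : a = b
      · subst h; simp [ih]
      · simp only [if_neg h, if_neg (show ¬ b = a from fun hh => h hh.symm)]

theorem prefix_iff_pvLcp : ∀ (as bs : List Char), as <+: bs ↔ pvLcp as bs = as.length := by
  intro as
  induction as with
  | nil => intro bs; simp [pvLcp]
  | cons a as ih =>
    intro bs
    cases bs with
    | nil => simp [pvLcp]
    | cons b bs =>
      simp only [List.cons_prefix_cons, pvLcp, List.length_cons]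
      by_cases h : a = b
      · simp [h, ih]
      · simp [h]

theorem pvLcp_eq_min_iff (as bs : List Char) :
    pvLcp as bs = min as.length bs.length ↔ (as <+: bs ∨ bs <+: as) := by
  constructor
  · intro h
    rcases Nat.le_total as.length bs.length with hle | hle
    · left
      rw [prefix_iff_pvLcp]; omega
    · right
      rw [prefix_iff_pvLcp, ← pvLcp_comm]; omega
  · intro h
    rcases h with h | h
    · have hl := h.length_le
      rw [prefix_iff_pvLcp] at h
      omega
    · have hl := h.length_le
      rw [prefix_iff_pvLcp, ← pvLcp_comm] at h
      omega

theorem pvAInner_spec : ∀ (as bs : List Char) (i c : Nat),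
    pvAInner i c as bs =
      (decide (pvLcp as bs < min as.length bs.length),
       if pvLcp as bs = 0 then c else max c (i + pvLcp as bs)) := by
  intro as
  induction as with
  | nil => intro bs i c; cases bs <;> simp [pvAInner, pvLcp]
  | cons a as ih =>
    intro bs i c
    cases bs with
    | nil => simp [pvAInner, pvLcp]
    | cons b bs =>
      by_cases h : a = b
      · subst h
        have hstep : pvAInner i c (a :: as) (a :: bs)
            = pvAInner (i + 1) (if i + 1 > c then i + 1 else c) as bs := by
          simp [pvAInner]
        have hl : pvLcp (a :: as) (a :: bs) = pvLcp as bs + 1 := by simp [pvLcp]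
        rw [hstep, ih, hl, Prod.mk.injEq]
        refine ⟨by simp only [decide_eq_decide, List.length_cons]; omega, ?_⟩
        rcases Nat.eq_zero_or_pos (pvLcp as bs) with h0 | h0
        · rw [h0]
          norm_num
          split_ifs <;> omega
        · rw [if_neg (by omega : ¬ pvLcp as bs = 0), if_neg (by omega : ¬ pvLcp as bs + 1 = 0)]
          split_ifs <;> omega
      · have hstep : pvAInner i c (a :: as) (b :: bs) = (true, c) := by
          simp [pvAInner, h]
        have hl : pvLcp (a :: as) (b :: bs) = 0 := by simp [pvLcp, h]
        rw [hstep, hl, Prod.mk.injEq]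
        refine ⟨?_, by norm_num⟩
        have hmin : (0:Nat) < min ((a :: as).length) ((b :: bs).length) := by simp
        simp [hmin]

theorem pvAInner_zero (as bs : List Char) (c : Nat) :
    pvAInner 0 c as bs =
      (decide (pvLcp as bs < min as.length bs.length), max c (pvLcp as bs)) := by
  rw [pvAInner_spec]
  congr 1
  split_ifs <;> omega


theorem pvAOuter_spec (word : String) : ∀ (ws : List String) (c : Nat),
    (∀ w ∈ ws, w ≠ word → pvLcp word.toList w.toList < min word.toList.length w.toList.length) →
    pvAOuter word ws false c =
      (false, List.foldl (fun c w => if w = word then c else max c (pvLcp word.toList w.toList)) c ws) := by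
  intro ws
  induction ws with
  | nil => intro c _; simp [pvAOuter]
  | cons w ws ih =>
    intro c h
    by_cases hw : w = word
    · simp only [pvAOuter, Bool.false_eq_true, if_false, hw, reduceIte, List.foldl_cons]
      exact ih c (fun x hx => h x (List.mem_cons_of_mem _ hx))
    · have hlt := h w (List.mem_cons_self) hw
      have hd : decide (pvLcp word.toList w.toList < min word.toList.length w.toList.length) = true := by
        simpa using hlt
      simp only [pvAOuter, Bool.false_eq_true, if_false, if_neg hw, pvAInner_zero, hd,
        Bool.true_eq_false, List.foldl_cons]
      exact ih _ (fun x hx => h x (List.mem_cons_of_mem _ hx))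


theorem pvFoldl_max_eq (word : String) : ∀ (ws : List String) (c : Nat),
    List.foldl (fun c w => if w = word then c else max c (pvLcp word.toList w.toList)) c ws =
      max c (List.foldr (fun w m => if w = word then m else max (pvLcp word.toList w.toList) m) 0 ws) := by
  intro ws
  induction ws with
  | nil => intro c; simp
  | cons w ws ih =>
    intro c
    simp only [List.foldl_cons, List.foldr_cons, ih]
    split <;> omega

theorem pvFoldr_others_eq (word : String) (ws : List String) :
    List.foldr (fun w m => max (pvLcp word.toList w) m) 0
        ((ws.filter (fun w => w != word)).map String.toList) =
      List.foldr (fun w m => if w = word then m else max (pvLcp word.toList w.toList) m) 0 ws := by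
  induction ws with
  | nil => simp
  | cons w ws ih =>
    by_cases hw : w = word
    · simp [List.filter_cons, hw, ih]
    · simp [List.filter_cons, bne_iff_ne, hw, ih]

theorem pvLe_foldr_max (word : String) (l : List (List Char)) (n : Nat) (hn : 1 ≤ n) :
    n ≤ List.foldr (fun w m => max (pvLcp word.toList w) m) 0 l ↔ ∃ w ∈ l, n ≤ pvLcp word.toList w := by
  induction l with
  | nil =>
    simp only [List.foldr_nil, List.not_mem_nil]
    constructor
    · intro h; omega
    · rintro ⟨w, hw, -⟩; exact absurd hw (by simp)
  | cons w l ih =>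
    simp only [List.foldr_cons, le_max_iff, ih, List.mem_cons]
    constructor
    · rintro (h | ⟨x, hx, hxn⟩)
      · exact ⟨w, Or.inl rfl, h⟩
      · exact ⟨x, Or.inr hx, hxn⟩
    · rintro ⟨x, hx | hx, hxn⟩
      · subst hx; exact Or.inl hxn
      · exact Or.inr ⟨x, hx, hxn⟩


theorem pvTake_prefix_iff : ∀ (k : Nat) (as bs : List Char), k ≤ as.length →
    (as.take k <+: bs ↔ k ≤ pvLcp as bs) := by
  intro k
  induction k with
  | zero => intro as bs _; simp
  | succ k ih =>
    intro as bs hk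
    cases as with
    | nil => simp at hk
    | cons a as =>
      cases bs with
      | nil =>
        have h0 : pvLcp (a :: as) [] = 0 := rfl
        rw [h0, List.take_succ_cons]
        simp [List.prefix_nil]
      | cons b bs =>
        rw [List.take_succ_cons, List.cons_prefix_cons]
        simp only [pvLcp]
        by_cases h : a = b
        · subst h
          rw [if_pos rfl, ih as bs (by simp at hk; omega)]
          simp only [true_and]
          omega
        · rw [if_neg h]
          constructor
          · rintro ⟨rfl, -⟩; exact absurd rfl h
          · intro hc; omega


theorem pvBSearch_spec (word : String) (others : List (List Char)) :
    ∀ (k : Nat), k ≤ word.toList.length →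
    pvBSearch word.toList others k =
      min k (List.foldr (fun w m => max (pvLcp word.toList w) m) 0 others) := by
  intro k
  induction k with
  | zero => intro _; simp [pvBSearch]
  | succ k ih =>
    intro hk
    set M := List.foldr (fun w m => max (pvLcp word.toList w) m) 0 others with hM
    by_cases h : k + 1 ≤ M
    · have hany : others.any (fun w => PySem.Chars.startswith w (word.toList.take (k + 1))) = true := by
        rw [pvLe_foldr_max word others (k + 1) (by omega)] at h
        obtain ⟨w, hw, hwn⟩ := h
        rw [List.any_eq_true]
        exact ⟨w, hw, by rw [PySem.Chars.startswith_iff, pvTake_prefix_iff (k + 1) _ _ hk]; exact hwn⟩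
      simp only [pvBSearch, hany, reduceIte]
      omega
    · have hany : others.any (fun w => PySem.Chars.startswith w (word.toList.take (k + 1))) = false := by
        rw [Bool.eq_false_iff, ne_eq, List.any_eq_true]
        rintro ⟨w, hw, hws⟩
        rw [PySem.Chars.startswith_iff, pvTake_prefix_iff (k + 1) _ _ hk] at hws
        exact h ((pvLe_foldr_max word others (k + 1) (by omega)).mpr ⟨w, hw, hws⟩)
      simp only [pvBSearch, hany, Bool.false_eq_true, if_false]
      rw [ih (by omega)]
      omega

-- ===== VERDICT (by name: the statement is the Claim_ definition above) =====
theorem get_naive_unique_prefix_spec : Claim_equal_get_naive_unique_prefix := by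
  intro word words _ hpre
  obtain ⟨hne, hpr⟩ := hpre
  have hwl : word.toList ≠ [] := by
    intro h
    exact hne (by simpa using congrArg String.ofList h)
  -- every other word has a strictly short common prefix with word
  have hlt : ∀ w ∈ words, w ≠ word →
      pvLcp word.toList w.toList < min word.toList.length w.toList.length := by
    intro w hw hwne
    have h := hpr w hw hwne
    have hle := pvLcp_le_min word.toList w.toList
    have hne' : pvLcp word.toList w.toList ≠ min word.toList.length w.toList.length := by
      intro hEq
      rcases (pvLcp_eq_min_iff _ _).mp hEq with hp | hp
      · exact h.2 hp
      · exact h.1 hp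
    omega
  set M := List.foldr (fun w m => max (pvLcp word.toList w) m) 0
      ((words.filter (fun w => w != word)).map String.toList) with hMdef
  have hMfold : M = List.foldr (fun w m => if w = word then m else max (pvLcp word.toList w.toList) m) 0 words :=
    pvFoldr_others_eq word words
  have hMlt : M < word.toList.length := by
    by_contra hcon
    push_neg at hcon
    have h1 : 1 ≤ word.toList.length := by
      rcases hl : word.toList with _ | ⟨a, l⟩
      · exact absurd hl hwl
      · simp [hl]
    have := (pvLe_foldr_max word _ word.toList.length h1).mp hcon
    obtain ⟨w, hw, hwn⟩ := this
    simp only [List.mem_map, List.mem_filter, bne_iff_ne] at hw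
    obtain ⟨s, ⟨hs, hsne⟩, rfl⟩ := hw
    have := hlt s hs hsne
    omega
  -- A side
  unfold Spec_get_naive_unique_prefix get_naive_unique_prefix get_naive_unique_prefix_alt
  rw [if_neg hwl, if_neg hwl]
  rw [pvAOuter_spec word words 0 hlt]
  simp only
  rw [pvFoldl_max_eq, ← hMfold, Nat.max_eq_right (Nat.zero_le _)]
  rw [if_neg (by omega : ¬ M = word.toList.length)]
  -- B side
  have hanyB : ((words.filter (fun w => w != word)).map String.toList).any
      (fun w => PySem.Chars.startswith w word.toList || PySem.Chars.startswith word.toList w) = false := by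
    rw [Bool.eq_false_iff, ne_eq, List.any_eq_true]
    rintro ⟨w, hw, hws⟩
    simp only [List.mem_map, List.mem_filter, bne_iff_ne] at hw
    obtain ⟨s, ⟨hs, hsne⟩, rfl⟩ := hw
    rcases Bool.or_eq_true_iff.mp hws with h | h
    · exact (hpr s hs hsne).2 ((PySem.Chars.startswith_iff _ _).mp h)
    · exact (hpr s hs hsne).1 ((PySem.Chars.startswith_iff _ _).mp h)
  simp only [hanyB, Bool.false_eq_true, if_false]
  rw [pvBSearch_spec word _ word.toList.length (le_refl _), ← hMdef]
  rw [Nat.min_eq_right (by omega)]
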